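-- pv_equiv track=rewrite | github.com/willysoley/UKB_GCTA_GREML | scripts/prepare_gcta_inputs.py | discover_default_qcovar_cols
-- ===== SOURCE A (Python) =====
-- from typing import Dict, Iterable, List, Sequence, Tuple
--
-- def first_existing(headers: Sequence[str], candidates: Iterable[str]) -> str | None:
--     header_set = set(headers)
--     for c in candidates:
--         if c in header_set:
--             return c
--     return None
--
-- def find_numbered_columns(headers: Sequence[str], prefixes: Sequence[str], n: int) -> List[str]:
--     found: List[str] = []
--     for i in range(1, n + 1):
--         candidates = [f"{p}{i}" for p in prefixes]
--         col = first_existing(headers, candidates)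
--         if col and col not in found:
--             found.append(col)
--     return found
--
-- def discover_default_qcovar_cols(
--     headers: Sequence[str],
--     age_col: str,
--     pc_prefix: str,
--     num_pcs: int,
-- ) -> Tuple[List[str], str | None]:
--     qcovars: List[str] = []
--
--     age_found = first_existing(headers, [age_col, "participant.p21022", "participant.p21022_i0", "p21022", "age"])
--     if age_found:
--         qcovars.append(age_found)
--
--     pcs = find_numbered_columns(
--         headers,
--         prefixes=[pc_prefix, "participant.p22009_a", "p22009_a", "PC", "pc"],
--         n=num_pcs,
--     )
--     qcovars.extend([pc for pc in pcs if pc not in qcovars])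
--     return qcovars, age_found
-- ===== SOURCE B (Python) =====
-- def discover_default_qcovar_cols(headers, age_col, pc_prefix, num_pcs):
--     header_set = set(headers)
--     age_found = next(
--         (c for c in (age_col, "participant.p21022", "participant.p21022_i0", "p21022", "age")
--          if c in header_set),
--         None,
--     )
--
--     # Lowest priority first: later (higher-priority) prefixes overwrite earlier ones,
--     # so best[i] ends up as the highest-priority candidate present for index i.
--     best = {}
--     for p in ("pc", "PC", "p22009_a", "participant.p22009_a", pc_prefix):
--         for i in range(1, num_pcs + 1):
--             cand = p + str(i)
--             if cand in header_set:
--                 best[i] = cand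
--
--     qcovars = [age_found] if age_found else []
--     for i in range(1, num_pcs + 1):
--         if i in best:
--             pc = best[i]
--             if pc not in qcovars:
--                 qcovars.append(pc)
--     return qcovars, age_found
-- ===== Notes on version B (the rewrite author's own statement) =====
-- stated objective: faster
-- what changed: B builds the header set once and flips the loop nesting: it iterates prefixes in reverse priority order, letting higher-priority prefixes overwrite a dict keyed by the PC index, then reads indices 1..num_pcs in order with a single combined dedup, instead of A's per-index scan that rebuilds set(headers) and re-generates all candidates for every index.
import Mathlib
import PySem

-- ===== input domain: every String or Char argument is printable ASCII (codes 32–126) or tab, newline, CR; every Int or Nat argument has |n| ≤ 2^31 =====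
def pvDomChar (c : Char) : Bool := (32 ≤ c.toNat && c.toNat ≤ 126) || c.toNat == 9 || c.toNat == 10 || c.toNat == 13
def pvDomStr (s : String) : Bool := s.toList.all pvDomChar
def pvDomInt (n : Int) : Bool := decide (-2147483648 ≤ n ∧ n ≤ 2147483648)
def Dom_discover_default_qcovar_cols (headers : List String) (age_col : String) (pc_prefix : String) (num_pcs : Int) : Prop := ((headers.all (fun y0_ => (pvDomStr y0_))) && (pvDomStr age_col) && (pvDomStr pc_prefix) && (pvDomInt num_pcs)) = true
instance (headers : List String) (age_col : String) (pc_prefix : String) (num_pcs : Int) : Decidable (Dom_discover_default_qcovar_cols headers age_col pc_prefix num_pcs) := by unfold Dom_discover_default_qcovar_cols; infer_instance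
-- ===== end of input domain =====

-- B builds the header set once and flips the loop nesting (prefix-major, reverse priority,
-- overwriting a dict keyed by the PC index) instead of A's per-index candidate scan that
-- rebuilds set(headers) for every index; objective: faster (constant-factor).

-- ===== PORT A =====

-- candidate lists shared by both ports (module-level literals in the Python)
def pvAgeCandidates (age_col : String) : List String :=
  [age_col, "participant.p21022", "participant.p21022_i0", "p21022", "age"]

def pvPcPrefixes (pc_prefix : String) : List String :=
  [pc_prefix, "participant.p22009_a", "p22009_a", "PC", "pc"]

-- first_existing: builds set(headers), returns the first candidate in it
def pvFirstExisting (headers : List String) (candidates : List String) : Option String :=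
  let header_set : PySem.Set String := PySem.Set.ofList headers
  candidates.find? (fun c => PySem.Set.contains header_set c)

-- find_numbered_columns: for i in range(1, n+1): col = first_existing(...); if col and col not in found: append
def pvFindNumberedColumns (headers : List String) (prefixes : List String) (n : Int) : List String :=
  (PySem.List.pyRange 1 (n + 1) 1).foldl
    (fun found i =>
      let candidates := prefixes.map (fun p => p ++ PySem.Int.toStr i)
      match pvFirstExisting headers candidates with
      | some col => if col ≠ "" ∧ col ∉ found then found ++ [col] else found
      | none => found)
    []

def discover_default_qcovar_cols (headers : List String) (age_col : String) (pc_prefix : String) (num_pcs : Int) : List String × Option String :=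
  let age_found := pvFirstExisting headers (pvAgeCandidates age_col)
  let qcovars : List String :=
    match age_found with
    | some a => if a ≠ "" then [a] else []   -- `if age_found:` — truthiness of the Optional[str]
    | none => []
  let pcs := pvFindNumberedColumns headers (pvPcPrefixes pc_prefix) num_pcs
  (qcovars ++ pcs.filter (fun pc => pc ∉ qcovars), age_found)

-- ===== PORT B =====

-- B's overwrite dict: prefixes in reverse priority order, best[i] = p + str(i) when present
def pvAltBest (hs : PySem.Set String) (pc_prefix : String) (num_pcs : Int) : PySem.Dict Int String :=
  ["pc", "PC", "p22009_a", "participant.p22009_a", pc_prefix].foldl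
    (fun d p =>
      (PySem.List.pyRange 1 (num_pcs + 1) 1).foldl
        (fun d i =>
          if PySem.Set.contains hs (p ++ PySem.Int.toStr i) then d.insert i (p ++ PySem.Int.toStr i) else d)
        d)
    PySem.Dict.empty

def discover_default_qcovar_cols_alt (headers : List String) (age_col : String) (pc_prefix : String) (num_pcs : Int) : List String × Option String :=
  let hs : PySem.Set String := PySem.Set.ofList headers
  let age_found := (pvAgeCandidates age_col).find? (fun c => PySem.Set.contains hs c)
  let best := pvAltBest hs pc_prefix num_pcs
  let qcovars0 : List String :=
    match age_found with
    | some a => if a ≠ "" then [a] else []   -- `[age_found] if age_found else []`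
    | none => []
  let qcovars :=
    (PySem.List.pyRange 1 (num_pcs + 1) 1).foldl
      (fun q i =>
        match best.get? i with
        | some pc => if pc ∉ q then q ++ [pc] else q
        | none => q)
      qcovars0
  (qcovars, age_found)

-- ===== PRECONDITION & SPEC =====
def Spec_discover_default_qcovar_cols (headers : List String) (age_col : String) (pc_prefix : String) (num_pcs : Int) (out : List String × Option String) : Prop := out = discover_default_qcovar_cols_alt headers age_col pc_prefix num_pcs
instance (headers : List String) (age_col : String) (pc_prefix : String) (num_pcs : Int) (out : List String × Option String) : Decidable (Spec_discover_default_qcovar_cols headers age_col pc_prefix num_pcs out) := by unfold Spec_discover_default_qcovar_cols; infer_instance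

-- ===== CLAIM (what is proved, stated in full; the proofs are below) =====
def Claim_equal_discover_default_qcovar_cols : Prop := ∀ (headers : List String) (age_col : String) (pc_prefix : String) (num_pcs : Int), Dom_discover_default_qcovar_cols headers age_col pc_prefix num_pcs → Spec_discover_default_qcovar_cols headers age_col pc_prefix num_pcs (discover_default_qcovar_cols headers age_col pc_prefix num_pcs)

-- ===== LEMMAS AND PROOFS =====

-- str(i) is never empty, so no candidate string p + str(i) is empty
theorem pv_toStr_ne_empty (i : Int) : PySem.Int.toStr i ≠ "" := by
  intro h
  have h' := congrArg String.toList h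
  rw [PySem.Int.toList_toStr] at h'
  simp only [PySem.Int.toChars] at h'
  split at h'
  · exact absurd h' (by simp)
  · exact absurd (congrArg List.length h')
      (by simp [Nat.ne_of_gt (@Nat.length_toDigits_pos 10 i.toNat)])

theorem pv_append_toStr_ne_empty (p : String) (i : Int) : p ++ PySem.Int.toStr i ≠ "" := by
  intro h
  simp at h
  exact pv_toStr_ne_empty i h.2

-- a fold of guarded single-key inserts: key i holds g i iff i was visited with c i true
theorem pv_get?_foldl_insert_if (l : List Int) (c : Int → Bool) (g : Int → String)
    (d : PySem.Dict Int String) (i : Int) :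
    (l.foldl (fun d j => if c j then d.insert j (g j) else d) d).get? i
      = if i ∈ l ∧ c i = true then some (g i) else d.get? i := by
  induction l generalizing d with
  | nil => simp
  | cons j t ih =>
    simp only [List.foldl_cons, ih]
    by_cases hmem : i ∈ t ∧ c i = true
    · simp [hmem, List.mem_cons]
    · by_cases hij : i = j
      · subst hij
        by_cases hc : c i = true
        · simp [hc, PySem.Dict.get?_insert_self]
        · simp [hc]
      · by_cases hc : c j = true
        · simp [hmem, hij, hc, PySem.Dict.get?_insert_of_ne _ _ hij]
        · simp [hmem, hij, hc]

-- characterization of B's dict: for a visited index, best[i] is the first (priority-order) candidate present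
theorem pv_best_get? (hs : PySem.Set String) (pc_prefix : String) (num_pcs : Int) (i : Int)
    (hi : i ∈ PySem.List.pyRange 1 (num_pcs + 1) 1) :
    (pvAltBest hs pc_prefix num_pcs).get? i
      = ((pvPcPrefixes pc_prefix).map (fun p => p ++ PySem.Int.toStr i)).find?
          (fun c => PySem.Set.contains hs c) := by
  unfold pvAltBest pvPcPrefixes
  simp only [List.foldl_cons, List.foldl_nil, List.map_cons, List.map_nil]
  rw [pv_get?_foldl_insert_if, pv_get?_foldl_insert_if, pv_get?_foldl_insert_if,
      pv_get?_foldl_insert_if, pv_get?_foldl_insert_if]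
  simp only [hi, true_and, PySem.Dict.get?_empty, List.find?_cons]
  cases PySem.Set.contains hs (pc_prefix ++ PySem.Int.toStr i) <;>
  cases PySem.Set.contains hs ("participant.p22009_a" ++ PySem.Int.toStr i) <;>
  cases PySem.Set.contains hs ("p22009_a" ++ PySem.Int.toStr i) <;>
  cases PySem.Set.contains hs ("PC" ++ PySem.Int.toStr i) <;>
  cases PySem.Set.contains hs ("pc" ++ PySem.Int.toStr i) <;>
  simp

-- a fold that appends h j (when some and new) equals the dedup fold over the filterMapped list
theorem pv_foldl_match_dedup (l : List Int) (h : Int → Option String) (b : List String) :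
    l.foldl (fun q j => match h j with
      | some c => if c ∉ q then q ++ [c] else q
      | none => q) b
      = (l.filterMap h).foldl (fun q c => if c ∉ q then q ++ [c] else q) b := by
  induction l generalizing b with
  | nil => simp
  | cons j t ih =>
    simp only [List.foldl_cons, List.filterMap_cons]
    cases h j with
    | none => exact ih _
    | some c => exact ih _

-- the dedup fold step IS PySem.Set.add
theorem pv_dedup_step_eq_add :
    (fun (q : List String) c => if c ∉ q then q ++ [c] else q)
      = fun (q : PySem.Set String) c => PySem.Set.add q c := by
  funext q c
  rw [PySem.Set.add_eq_ite]
  by_cases hc : c ∈ q <;> simp [hc]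

-- ===== VERDICT (by name: the statement is the Claim_ definition above) =====
theorem discover_default_qcovar_cols_spec : Claim_equal_discover_default_qcovar_cols := by
  intro headers age_col pc_prefix num_pcs _
  unfold Spec_discover_default_qcovar_cols
  unfold discover_default_qcovar_cols discover_default_qcovar_cols_alt
  simp only []
  have hage : pvFirstExisting headers (pvAgeCandidates age_col)
      = (pvAgeCandidates age_col).find? (fun c => PySem.Set.contains (PySem.Set.ofList headers) c) := rfl
  rw [hage]
  refine Prod.ext ?_ rfl
  simp only []
  -- abbreviations
  set hs := PySem.Set.ofList headers with hhs
  set rng := PySem.List.pyRange 1 (num_pcs + 1) 1 with hrng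
  set colA := fun i => pvFirstExisting headers ((pvPcPrefixes pc_prefix).map (fun p => p ++ PySem.Int.toStr i)) with hcolA
  set qc0 : List String := (match (pvAgeCandidates age_col).find? (fun c => PySem.Set.contains hs c) with
    | some a => if a ≠ "" then [a] else []
    | none => []) with hqc0
  -- B's fold over the dict = fold over colA
  have hB : rng.foldl (fun q i => match (pvAltBest hs pc_prefix num_pcs).get? i with
        | some pc => if pc ∉ q then q ++ [pc] else q
        | none => q) qc0
      = rng.foldl (fun q i => match colA i with
        | some pc => if pc ∉ q then q ++ [pc] else q
        | none => q) qc0 := by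
    refine PySem.List.foldl_congr_mem _ _ _ _ (fun acc i hi => ?_)
    rw [pv_best_get? hs pc_prefix num_pcs i hi]
    rfl
  -- A's fold: drop the never-failing nonemptiness guard
  have hA : pvFindNumberedColumns headers (pvPcPrefixes pc_prefix) num_pcs
      = rng.foldl (fun q i => match colA i with
        | some pc => if pc ∉ q then q ++ [pc] else q
        | none => q) [] := by
    unfold pvFindNumberedColumns
    refine PySem.List.foldl_congr_mem _ _ _ _ (fun acc i _ => ?_)
    simp only []
    cases hc : colA i with
    | none => simp only [hcolA] at hc; rw [hc]
    | some c =>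
      have hmem : c ∈ (pvPcPrefixes pc_prefix).map (fun p => p ++ PySem.Int.toStr i) := by
        have := hc
        simp only [hcolA, pvFirstExisting] at this
        exact List.mem_of_find?_eq_some this
      obtain ⟨p, -, rfl⟩ := List.mem_map.mp hmem
      have hne := pv_append_toStr_ne_empty p i
      simp only [hcolA] at hc
      rw [hc]
      simp [hne]
  rw [hB, hA, pv_foldl_match_dedup, pv_foldl_match_dedup, pv_dedup_step_eq_add]
  set raw := rng.filterMap colA with hraw
  have hupd : ∀ b : List String, raw.foldl (fun q c => PySem.Set.add q c) b = PySem.Set.update b raw := fun _ => rfl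
  rw [hupd, hupd, PySem.Set.update_eq_append_filter, PySem.Set.update_eq_append_filter]
  simp only [List.nil_append]
  have hnil : List.filter (fun y => !PySem.Set.contains ([] : PySem.Set String) y) (PySem.Set.ofList raw)
      = PySem.Set.ofList raw := by
    simp [PySem.Set.contains]
  rw [hnil]
  congr 1
  refine List.filter_congr (fun c _ => ?_)
  simp [PySem.Set.contains]
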